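-- pv_equiv track=rewrite | github.com/AMBASSAD0R/MINI_PAINT | Picture/square_full.py | square_full
-- ===== SOURCE A (Python) =====
-- def square_full(x, y, w, h, bg):
--     """
--     Полный квадрат
--     """
--     mas = [[] for _ in range(h + y)]
--     for yy in range(h + y):
--         for xx in range(w + x):
--             if h + y >= yy >= y and w + x >= xx >= x:
--                 mas[yy].append(bg)
--             else:
--                 mas[yy].append('')  # хз надо ли это
--     return mas
-- ===== SOURCE B (Python) =====
-- def square_full(x, y, w, h, bg):
--     nrows = max(h + y, 0)
--     if nrows == 0:
--         return []
--     ncols = max(w + x, 0)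
--     lead = min(max(x, 0), ncols)
--     active = [''] * lead + [bg] * (ncols - lead)
--     blank = [''] * ncols
--     top = min(max(y, 0), nrows)
--     return [list(blank) for _ in range(top)] + [list(active) for _ in range(nrows - top)]
-- ===== Notes on version B (the rewrite author's own statement) =====
-- stated objective: simpler
-- what changed: B precomputes two row templates (a blank row and the active '' -prefix/bg-suffix row) once and tiles the grid by replicating them, instead of A's nested per-cell loop with a conditional inside.
import Mathlib
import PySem

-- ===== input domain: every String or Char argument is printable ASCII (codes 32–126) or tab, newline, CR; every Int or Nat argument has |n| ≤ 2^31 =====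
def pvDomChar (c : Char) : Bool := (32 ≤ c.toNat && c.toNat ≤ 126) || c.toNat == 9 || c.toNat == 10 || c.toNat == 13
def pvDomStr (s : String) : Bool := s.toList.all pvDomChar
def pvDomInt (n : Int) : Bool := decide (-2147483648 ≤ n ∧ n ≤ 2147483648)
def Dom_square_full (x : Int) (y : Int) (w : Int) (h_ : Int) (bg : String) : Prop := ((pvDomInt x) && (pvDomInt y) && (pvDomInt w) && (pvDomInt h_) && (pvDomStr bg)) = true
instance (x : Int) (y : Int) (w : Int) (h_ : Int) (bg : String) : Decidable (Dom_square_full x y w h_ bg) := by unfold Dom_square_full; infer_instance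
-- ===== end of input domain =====

-- B builds the grid from two precomputed row templates (blank/active) by replication
-- instead of A's per-cell double loop with a conditional; objective: simpler.

-- ===== PORT A =====
-- mas = [[] for _ in range(h+y)]; nested loops append bg or '' to mas[yy]
def square_full (x : Int) (y : Int) (w : Int) (h_ : Int) (bg : String) : List (List String) :=
  let mas : List (List String) := (PySem.List.pyRange 0 (h_ + y) 1).map (fun _ => ([] : List String))
  (PySem.List.pyRange 0 (h_ + y) 1).foldl (fun mas yy =>
    mas.modify yy.toNat (fun row =>
      (PySem.List.pyRange 0 (w + x) 1).foldl (fun row xx =>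
        row ++ [if h_ + y ≥ yy ∧ yy ≥ y ∧ w + x ≥ xx ∧ xx ≥ x then bg else ""]) row)) mas

-- ===== PORT B =====
def square_full_alt (x : Int) (y : Int) (w : Int) (h_ : Int) (bg : String) : List (List String) :=
  let nrows := max (h_ + y) 0
  if nrows = 0 then [] else
    let ncols := max (w + x) 0
    let lead := min (max x 0) ncols
    let active := List.replicate lead.toNat "" ++ List.replicate (ncols - lead).toNat bg
    let blank := List.replicate ncols.toNat ""
    let top := min (max y 0) nrows
    List.replicate top.toNat blank ++ List.replicate (nrows - top).toNat active

-- ===== PRECONDITION & SPEC =====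
def Spec_square_full (x : Int) (y : Int) (w : Int) (h_ : Int) (bg : String) (out : List (List String)) : Prop := out = square_full_alt x y w h_ bg
instance (x : Int) (y : Int) (w : Int) (h_ : Int) (bg : String) (out : List (List String)) : Decidable (Spec_square_full x y w h_ bg out) := by unfold Spec_square_full; infer_instance

-- ===== CLAIM (what is proved, stated in full; the proofs are below) =====
def Claim_equal_square_full : Prop := ∀ (x : Int) (y : Int) (w : Int) (h_ : Int) (bg : String), Dom_square_full x y w h_ bg → Spec_square_full x y w h_ bg (square_full x y w h_ bg)

-- ===== LEMMAS AND PROOFS =====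

-- appending one element per range item builds the mapped list
lemma foldl_append_map (f : Int → String) (n : Int) (row : List String) :
    (PySem.List.pyRange 0 n 1).foldl (fun r xx => r ++ [f xx]) row = row ++ (PySem.List.pyRange 0 n 1).map f := by
  induction PySem.List.pyRange 0 n 1 generalizing row with
  | nil => simp
  | cons a t ih => simp [ih]

-- mapping a threshold-if over range 0..c-1 yields two replicate blocks
lemma range_map_threshold {α : Type} (t : Int) (a b : α) (c : Int) :
    (PySem.List.pyRange 0 c 1).map (fun i => if t ≤ i then b else a)
      = List.replicate (min (max t 0) (max c 0)).toNat a
        ++ List.replicate ((max c 0) - min (max t 0) (max c 0)).toNat b := by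
  apply List.ext_getElem
  · simp [PySem.List.length_pyRange_one]
    omega
  · intro k h1 h2
    have hk : (k:Int) < c := by
      simp [PySem.List.length_pyRange_one] at h1
      omega
    rw [List.getElem_map, PySem.List.getElem_pyRange_one]
    by_cases ht : t ≤ 0 + (k:Int)
    · rw [if_pos ht, List.getElem_append_right (by simp; omega)]
      exact (List.getElem_replicate ..).symm
    · rw [if_neg ht, List.getElem_append_left (by simp; omega)]
      exact (List.getElem_replicate ..).symm

lemma modify_append_lt {α : Type} (f : α → α) :
    ∀ (l1 l2 : List α) (i : Nat), i < l1.length → (l1 ++ l2).modify i f = l1.modify i f ++ l2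
  | [], _, i, h => by simp at h
  | a :: t, l2, 0, _ => by simp
  | a :: t, l2, i + 1, h => by
      simp only [List.cons_append, List.modify_succ_cons]
      rw [modify_append_lt f t l2 i (by simpa using h)]

lemma modify_append_last {α : Type} (f : α → α) (l1 : List α) (a : α) :
    (l1 ++ [a]).modify l1.length f = l1 ++ [f a] := by
  induction l1 with
  | nil => simp
  | cons x t ih => simp [ih]

-- the outer fold of per-row modifications over distinct indices maps f over each row position
lemma foldl_modify_map (f : Int → List String → List String) (n : Int)
    (init : List (List String)) (hlen : init.length = n.toNat) :
    (PySem.List.pyRange 0 n 1).foldl (fun mas yy => mas.modify yy.toNat (f yy)) init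
      = (List.range n.toNat).map (fun i : Nat => f (i:Int) (init.getD i [])) := by
  by_cases hn : n ≤ 0
  · rw [PySem.List.pyRange_one_eq_nil (by omega)]
    have : n.toNat = 0 := by omega
    rw [this] at hlen ⊢
    simp [List.eq_nil_of_length_eq_zero hlen]
  · push Not at hn
    obtain ⟨m, rfl⟩ : ∃ m : Nat, n = (m : Int) := ⟨n.toNat, by omega⟩
    rw [Int.toNat_natCast] at hlen ⊢
    clear hn
    induction m generalizing init with
    | zero => simp [List.eq_nil_of_length_eq_zero hlen, PySem.List.pyRange_one_eq_nil]
    | succ k ih =>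
      have hstep : PySem.List.pyRange 0 ((k:Int)+1) 1 = PySem.List.pyRange 0 (k:Int) 1 ++ [(k:Int)] := by
        exact PySem.List.pyRange_one_succ_right (by omega)
      rw [show (((k+1 : Nat)) : Int) = (k:Int)+1 by push_cast; ring, hstep, List.foldl_append]
      -- split init into first k rows and the last row
      obtain ⟨pre, last, hinit, hpre⟩ : ∃ pre last, init = pre ++ [last] ∧ pre.length = k := by
        rcases List.eq_nil_or_concat init with rfl | ⟨pre, last, rfl⟩
        · simp at hlen
        · exact ⟨pre, last, by simp, by simpa using hlen⟩
      subst hinit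
      have hfold : (PySem.List.pyRange 0 (k:Int) 1).foldl (fun mas yy => mas.modify yy.toNat (f yy)) (pre ++ [last])
          = ((PySem.List.pyRange 0 (k:Int) 1).foldl (fun mas yy => mas.modify yy.toNat (f yy)) pre) ++ [last] := by
        have step : ∀ (r : List Int) (p : List (List String)), (∀ z ∈ r, 0 ≤ z ∧ z < (p.length : Int)) →
            r.foldl (fun mas yy => mas.modify yy.toNat (f yy)) (p ++ [last])
              = (r.foldl (fun mas yy => mas.modify yy.toNat (f yy)) p) ++ [last] := by
          intro r
          induction r with
          | nil => intro p _; rfl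
          | cons a t iht =>
            intro p hb
            have ha := hb a (by simp)
            have hlt : a.toNat < p.length := by omega
            simp only [List.foldl_cons]
            rw [modify_append_lt _ _ _ _ hlt]
            exact iht _ (fun z hz => by
              have := hb z (by simp [hz])
              simpa [List.length_modify] using this)
        exact step _ pre (fun z hz => by
          rw [PySem.List.mem_pyRange_one] at hz
          exact ⟨hz.1, by omega⟩)
      rw [hfold, ih pre hpre]
      have hk' : ((k:Int)).toNat = ((List.range k).map (fun i : Nat => f (i:Int) (pre.getD i []))).length := by
        simp
      simp only [List.foldl_cons, List.foldl_nil]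
      rw [hk', modify_append_last, List.range_succ, List.map_append]
      congr 1
      · exact List.map_congr_left (fun i hi => by
          rw [List.mem_range] at hi
          congr 1
          rw [List.getD_append _ _ _ _ (by omega)])
      · have hgd : (pre ++ [last])[k]?.getD [] = last := by
          rw [List.getElem?_append_right (by omega)]
          simp [hpre]
        simp [List.getD, hgd]

-- a Nat-range map of an Int-threshold if, via pyRange
lemma natrange_map_threshold {α : Type} (t : Int) (a b : α) (n : Nat) :
    (List.range n).map (fun i : Nat => if t ≤ (i:Int) then b else a)
      = List.replicate (min (max t 0) (n:Int)).toNat a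
        ++ List.replicate ((n:Int) - min (max t 0) (n:Int)).toNat b := by
  have h1 : (List.range n).map (fun i : Nat => if t ≤ (i:Int) then b else a)
      = (PySem.List.pyRange 0 (n:Int) 1).map (fun i => if t ≤ i then b else a) := by
    rw [PySem.List.pyRange_zero_nat, List.map_map]
    rfl
  rw [h1, range_map_threshold]
  have : max (n:Int) 0 = (n:Int) := by omega
  rw [this]

theorem square_full_spec : Claim_equal_square_full := by
  intro x y w h_ bg _
  unfold Spec_square_full square_full square_full_alt
  rw [foldl_modify_map _ _ _ (by simp [PySem.List.length_pyRange_one])]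
  have hinit : ∀ i : Nat, (((PySem.List.pyRange 0 (h_+y) 1).map (fun _ => ([] : List String))).getD i []) = [] := by
    intro i
    simp only [List.getD, List.getElem?_map]
    cases (PySem.List.pyRange 0 (h_+y) 1)[i]? <;> simp
  have hrow : ∀ i : Nat, i < (h_+y).toNat →
      ((PySem.List.pyRange 0 (w+x) 1).foldl (fun row xx => row ++ [if h_+y ≥ (i:Int) ∧ (i:Int) ≥ y ∧ w+x ≥ xx ∧ xx ≥ x then bg else ""]) [])
        = if y ≤ (i:Int) then
            (List.replicate (min (max x 0) (max (w+x) 0)).toNat "" ++ List.replicate ((max (w+x) 0) - min (max x 0) (max (w+x) 0)).toNat bg)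
          else List.replicate (max (w+x) 0).toNat "" := by
    intro i hi
    rw [foldl_append_map, List.nil_append]
    by_cases hy : y ≤ (i:Int)
    · rw [if_pos hy]
      have hc : ∀ xx ∈ PySem.List.pyRange 0 (w+x) 1,
          (if h_+y ≥ (i:Int) ∧ (i:Int) ≥ y ∧ w+x ≥ xx ∧ xx ≥ x then bg else "") = (if x ≤ xx then bg else "") := by
        intro xx hxx
        rw [PySem.List.mem_pyRange_one] at hxx
        by_cases hx : x ≤ xx
        · rw [if_pos ⟨by omega, by omega, by omega, by omega⟩, if_pos hx]
        · rw [if_neg (by rintro ⟨_, _, _, h4⟩; exact hx h4), if_neg hx]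
      rw [List.map_congr_left hc, range_map_threshold]
    · rw [if_neg hy]
      have hc : ∀ xx ∈ PySem.List.pyRange 0 (w+x) 1,
          (if h_+y ≥ (i:Int) ∧ (i:Int) ≥ y ∧ w+x ≥ xx ∧ xx ≥ x then bg else "") = "" := by
        intro xx _
        rw [if_neg (by rintro ⟨_, h2, _⟩; exact hy h2)]
      rw [List.map_congr_left hc, List.map_const', PySem.List.length_pyRange_one]
      congr 1
      omega
  have hmap : (List.range (h_+y).toNat).map (fun i : Nat =>
        (PySem.List.pyRange 0 (w+x) 1).foldl (fun row xx => row ++ [if h_+y ≥ (i:Int) ∧ (i:Int) ≥ y ∧ w+x ≥ xx ∧ xx ≥ x then bg else ""])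
          (((PySem.List.pyRange 0 (h_+y) 1).map (fun _ => ([] : List String))).getD i []))
      = (List.range (h_+y).toNat).map (fun i : Nat =>
          if y ≤ (i:Int) then
            (List.replicate (min (max x 0) (max (w+x) 0)).toNat "" ++ List.replicate ((max (w+x) 0) - min (max x 0) (max (w+x) 0)).toNat bg)
          else List.replicate (max (w+x) 0).toNat "") := by
    refine List.map_congr_left (fun i hi => ?_)
    rw [List.mem_range] at hi
    rw [hinit i, hrow i hi]
  rw [hmap, natrange_map_threshold]
  have e1 : (min (max y 0) (((h_+y).toNat : Nat) : Int)).toNat = (min (max y 0) (max (h_+y) 0)).toNat := by omega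
  have e2 : ((((h_+y).toNat : Nat) : Int) - min (max y 0) (((h_+y).toNat : Nat) : Int)).toNat
      = ((max (h_+y) 0) - min (max y 0) (max (h_+y) 0)).toNat := by omega
  rw [e1, e2]
  by_cases h0 : max (h_ + y) 0 = 0
  · rw [if_pos h0]
    have c1 : (min (max y 0) (max (h_ + y) 0)).toNat = 0 := by omega
    have c2 : ((max (h_ + y) 0) - min (max y 0) (max (h_ + y) 0)).toNat = 0 := by omega
    rw [c1, c2]
    rfl
  · rw [if_neg h0]
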